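-- pv_equiv track=rewrite | github.com/user28060/Alignment-of-schema-only-and-instance-only-data | src/schema_instance/schema_instance_gpt/rules.py | validate_Released_itunes_amazon
-- ===== SOURCE A (Python) =====
-- def validate_Released_itunes_amazon(values):
--     for val in values:
--         if not isinstance(val, str):
--             return False
--         if len(val) != 10:
--             return False
--         if not val[0:4].isdigit() or not val[5:7].isdigit() or not val[8:10].isdigit():
--             return False
--         if val[4] != "-" or val[7] != "-":
--             return False
--     return True
-- ===== SOURCE B (Python) =====
-- def validate_Released_itunes_amazon(values):
--     return all(
--         isinstance(val, str)
--         and len(val) == 10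
--         and all(c == "-" if i in (4, 7) else c.isdigit() for i, c in enumerate(val))
--         for val in values
--     )
-- ===== Notes on version B (the rewrite author's own statement) =====
-- stated objective: simpler
-- what changed: Replaces the early-return loop with slice/index checks by a single all() over enumerate(val) applying a per-position rule (dash at 4 and 7, digit elsewhere).
import Mathlib
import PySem

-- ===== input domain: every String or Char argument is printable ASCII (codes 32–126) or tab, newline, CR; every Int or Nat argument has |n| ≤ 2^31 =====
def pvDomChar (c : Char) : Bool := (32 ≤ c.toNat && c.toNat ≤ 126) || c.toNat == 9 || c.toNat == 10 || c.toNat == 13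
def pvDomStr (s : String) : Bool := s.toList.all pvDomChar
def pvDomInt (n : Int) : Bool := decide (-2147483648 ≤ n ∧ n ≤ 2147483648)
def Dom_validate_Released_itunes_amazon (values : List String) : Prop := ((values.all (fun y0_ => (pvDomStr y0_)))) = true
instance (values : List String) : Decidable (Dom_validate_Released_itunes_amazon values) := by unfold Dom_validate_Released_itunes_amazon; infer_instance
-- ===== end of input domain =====

-- B replaces A's early-return loop with slice/index checks by a single all() over
-- enumerate(val) with a per-position rule (dash at 4 and 7, digit elsewhere); objective: simpler.

-- ===== PORT A =====
-- A: early-return loop; per element: length check, three digit slices, dash checks at 4 and 7.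
-- (the isinstance(val, str) check is always true under the List String typing and is omitted)
def validate_Released_itunes_amazon (values : List String) : Bool :=
  match values with
  | [] => true
  | val :: rest =>
      if PySem.Str.len val ≠ 10 then false
      else if (!PySem.Str.strIsdigit (PySem.Str.slice val (some 0) (some 4)))
           || (!PySem.Str.strIsdigit (PySem.Str.slice val (some 5) (some 7)))
           || (!PySem.Str.strIsdigit (PySem.Str.slice val (some 8) (some 10))) then false
      else if PySem.Str.pyGet? val 4 ≠ some '-' || PySem.Str.pyGet? val 7 ≠ some '-' then false
      else validate_Released_itunes_amazon rest

-- ===== PORT B =====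
-- B: one all() over the values; per value, one all() over enumerate(val) with a positional rule.
def pvAltOk (val : String) : Bool :=
  (PySem.Str.len val == 10) &&
  (PySem.List.enumerate val.toList 0).all (fun ic =>
    if ic.1 == 4 || ic.1 == 7 then ic.2 == '-' else PySem.Chars.isdigit ic.2)

def validate_Released_itunes_amazon_alt (values : List String) : Bool :=
  values.all pvAltOk

-- ===== PRECONDITION & SPEC =====
def Spec_validate_Released_itunes_amazon (values : List String) (out : Bool) : Prop := out = validate_Released_itunes_amazon_alt values
instance (values : List String) (out : Bool) : Decidable (Spec_validate_Released_itunes_amazon values out) := by unfold Spec_validate_Released_itunes_amazon; infer_instance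

-- ===== CLAIM (what is proved, stated in full; the proofs are below) =====
def Claim_equal_validate_Released_itunes_amazon : Prop := ∀ (values : List String), Dom_validate_Released_itunes_amazon values → Spec_validate_Released_itunes_amazon values (validate_Released_itunes_amazon values)

-- ===== LEMMAS AND PROOFS =====
lemma pv_len10 {cs : List Char} (h : cs.length = 10) :
    ∃ c0 c1 c2 c3 c4 c5 c6 c7 c8 c9, cs = [c0, c1, c2, c3, c4, c5, c6, c7, c8, c9] := by
  rcases cs with _ | ⟨c0, cs⟩; · simp at h
  rcases cs with _ | ⟨c1, cs⟩; · simp at h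
  rcases cs with _ | ⟨c2, cs⟩; · simp at h
  rcases cs with _ | ⟨c3, cs⟩; · simp at h
  rcases cs with _ | ⟨c4, cs⟩; · simp at h
  rcases cs with _ | ⟨c5, cs⟩; · simp at h
  rcases cs with _ | ⟨c6, cs⟩; · simp at h
  rcases cs with _ | ⟨c7, cs⟩; · simp at h
  rcases cs with _ | ⟨c8, cs⟩; · simp at h
  rcases cs with _ | ⟨c9, cs⟩; · simp at h
  rcases cs with _ | ⟨c10, cs⟩
  · exact ⟨c0, c1, c2, c3, c4, c5, c6, c7, c8, c9, rfl⟩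
  · simp at h

lemma pv_cons (val : String) (rest : List String) :
    validate_Released_itunes_amazon (val :: rest)
      = (pvAltOk val && validate_Released_itunes_amazon rest) := by
  by_cases h : val.toList.length = 10
  · obtain ⟨c0, c1, c2, c3, c4, c5, c6, c7, c8, c9, hv⟩ := pv_len10 h
    simp [validate_Released_itunes_amazon, pvAltOk, hv, PySem.Str.len,
      PySem.Chars.strIsdigit, PySem.List.enumerate, PySem.List.slice, PySem.List.clampIdx]
    rw [Bool.eq_iff_iff]
    simp
    tauto
  · have hl : ¬ ((val.length : Int) = 10) := by
      rw [← String.length_toList]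
      exact_mod_cast fun hh => h (by exact_mod_cast hh)
    simp [validate_Released_itunes_amazon, pvAltOk, PySem.Str.len, hl]

-- ===== VERDICT (by name: the statement is the Claim_ definition above) =====
theorem validate_Released_itunes_amazon_spec : Claim_equal_validate_Released_itunes_amazon := by
  intro values _
  unfold Spec_validate_Released_itunes_amazon validate_Released_itunes_amazon_alt
  induction values with
  | nil => rfl
  | cons v rest ih =>
      rw [pv_cons, ih, List.all_cons]
      exact (by simpa [Dom_validate_Released_itunes_amazon] using ‹Dom_validate_Released_itunes_amazon (v :: rest)› : pvDomStr v = true ∧ _).2
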